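-- pv_equiv track=rewrite | github.com/kishoreVen/valmiki | story_engine/production/template_registry.py | _parse_requirements
-- ===== SOURCE A (Python) =====
-- from typing import Any, Dict, List, Optional
--
-- def _parse_requirements(requirements_text: str) -> List[str]:
--     """Parse rendered requirements text into a list.
--
--     Requirements are lines starting with '- '.
--     Multi-line requirements are joined until the next '- ' line.
--     """
--     if not requirements_text:
--         return []
--
--     requirements = []
--     current: List[str] = []
--
--     for line in requirements_text.splitlines():
--         if line.startswith("- "):
--             if current:
--                 requirements.append("\n".join(current))
--             current = [line[2:]]  # Strip the '- ' prefix
--         elif current: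
--             current.append(line)
--
--     if current:
--         requirements.append("\n".join(current))
--
--     return requirements
-- ===== SOURCE B (Python) =====
-- def _parse_requirements(requirements_text):
--     """Find-boundary-then-slice parsing: drop the prelude before the first '- '
--     line, then repeatedly scan to the next '- ' boundary and slice one group off."""
--     if not requirements_text:
--         return []
--     lines = requirements_text.splitlines()
--     while lines and not lines[0].startswith("- "):
--         lines = lines[1:]
--     groups = []
--     while lines:
--         k = 1
--         while k < len(lines) and not lines[k].startswith("- "):
--             k += 1
--         groups.append("\n".join([lines[0][2:]] + lines[1:k]))
--         lines = lines[k:]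
--     return groups
-- ===== Notes on version B (the rewrite author's own statement) =====
-- stated objective: alternative
-- what changed: Replaces A's single accumulator loop carrying (requirements, current) with a skip-the-prelude pass followed by a boundary scan that slices one dash-prefixed group off the front of the line list per outer iteration.
import Mathlib
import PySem

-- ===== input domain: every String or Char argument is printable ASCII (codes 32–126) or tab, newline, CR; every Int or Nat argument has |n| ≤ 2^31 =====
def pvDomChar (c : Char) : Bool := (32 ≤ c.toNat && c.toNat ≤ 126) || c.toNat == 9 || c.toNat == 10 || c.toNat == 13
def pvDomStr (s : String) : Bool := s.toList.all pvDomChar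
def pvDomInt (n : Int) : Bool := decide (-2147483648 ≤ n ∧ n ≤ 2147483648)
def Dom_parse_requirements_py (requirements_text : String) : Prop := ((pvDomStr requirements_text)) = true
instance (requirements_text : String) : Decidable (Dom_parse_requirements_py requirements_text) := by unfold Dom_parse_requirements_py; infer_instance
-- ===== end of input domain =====

-- B replaces A's accumulator loop carrying (requirements, current) by a skip-the-prelude pass then a boundary scan slicing one '- ' group off the front per iteration (alternative decomposition, same cost).

-- ===== PORT A =====
-- one step of A's for-loop over the state (requirements, current)
def pvStepA (st : List String × List String) (line : String) : List String × List String :=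
  if PySem.Str.startswith line "- " then
    (if st.2 ≠ [] then st.1 ++ [PySem.Str.join "\n" st.2] else st.1,
     [PySem.Str.slice line (some 2) none])
  else if st.2 ≠ [] then (st.1, st.2 ++ [line]) else st

-- the trailing 'if current: requirements.append("\n".join(current))'
def pvFinishA (st : List String × List String) : List String :=
  if st.2 ≠ [] then st.1 ++ [PySem.Str.join "\n" st.2] else st.1

def parse_requirements_py (requirements_text : String) : List String :=
  if requirements_text = "" then []
  else pvFinishA ((PySem.Str.splitlines requirements_text).foldl pvStepA ([], []))

-- ===== PORT B =====
-- 'while lines and not lines[0].startswith("- "): lines = lines[1:]'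
def pvSkip : List String → List String
  | [] => []
  | l :: ls => if !PySem.Str.startswith l "- " then pvSkip ls else l :: ls

-- inner 'k = 1; while k < len(lines) and not lines[k].startswith("- "): k += 1': k - 1 over lines[1:]
def pvCount : List String → Nat
  | [] => 0
  | l :: ls => if !PySem.Str.startswith l "- " then pvCount ls + 1 else 0

-- outer 'while lines:' loop; lines[1:k] = ls.take (pvCount ls), lines[k:] = ls.drop (pvCount ls)
def pvLoopB : List String → List String → List String
  | acc, [] => acc
  | acc, l :: ls =>
      pvLoopB (acc ++ [PySem.Str.join "\n" (PySem.Str.slice l (some 2) none :: ls.take (pvCount ls))])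
              (ls.drop (pvCount ls))
termination_by _ rest => rest.length
decreasing_by simp [List.length_drop]

def parse_requirements_py_alt (requirements_text : String) : List String :=
  if requirements_text = "" then []
  else pvLoopB [] (pvSkip (PySem.Str.splitlines requirements_text))

-- ===== PRECONDITION & SPEC =====
def Spec_parse_requirements_py (requirements_text : String) (out : List String) : Prop := out = parse_requirements_py_alt requirements_text
instance (requirements_text : String) (out : List String) : Decidable (Spec_parse_requirements_py requirements_text out) := by unfold Spec_parse_requirements_py; infer_instance

-- ===== CLAIM (what is proved, stated in full; the proofs are below) =====
def Claim_equal_parse_requirements_py : Prop := ∀ (requirements_text : String), Dom_parse_requirements_py requirements_text → Spec_parse_requirements_py requirements_text (parse_requirements_py requirements_text)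

-- ===== LEMMAS AND PROOFS =====

-- pvLoopB's accumulator only ever grows by appending on the right
theorem pvLoopB_acc (n : Nat) : ∀ (r acc : List String), r.length ≤ n →
    pvLoopB acc r = acc ++ pvLoopB [] r := by
  induction n with
  | zero => intro r acc h; match r with | [] => simp [pvLoopB.eq_1]
  | succ n ih =>
    intro r acc h
    match r with
    | [] => simp [pvLoopB.eq_1]
    | l :: ls =>
      rw [pvLoopB.eq_2, pvLoopB.eq_2]
      simp only [List.nil_append]
      rw [ih _ _ (by simp at h ⊢; omega),
          ih (ls.drop (pvCount ls)) ([PySem.Str.join "\n" _]) (by simp at h ⊢; omega)]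
      simp

-- A's pending requirements pass unchanged through the rest of the fold
theorem pvFinishA_split (t : List String) : ∀ (s : List String × List String),
    pvFinishA (t.foldl pvStepA s) = s.1 ++ pvFinishA (t.foldl pvStepA ([], s.2)) := by
  induction t with
  | nil => intro s; cases s with | mk a b => by_cases hb : b = [] <;> simp [pvFinishA, hb]
  | cons x xs ihx =>
    intro s
    cases s with | mk a b =>
    simp only [List.foldl_cons]
    rw [ihx, ihx (pvStepA ([], b) x)]
    by_cases hx : PySem.Chars.startswith x.toList ['-', ' '] = true <;>
      by_cases hb : b = [] <;> simp [pvStepA, hx, hb]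

-- A's finish of a run started with a NONEMPTY current equals one joined group plus the remaining groups
theorem pvCur : ∀ (ls cur : List String), cur ≠ [] →
    pvFinishA (ls.foldl pvStepA ([], cur)) =
      PySem.Str.join "\n" (cur ++ ls.take (pvCount ls)) :: pvLoopB [] (ls.drop (pvCount ls)) := by
  intro ls
  induction ls with
  | nil => intro cur hc; simp [pvFinishA, pvCount, pvLoopB.eq_1, hc]
  | cons l t ih =>
    intro cur hc
    by_cases hp : PySem.Chars.startswith l.toList ['-', ' '] = true
    · have hstep : pvStepA ([], cur) l =
          ([PySem.Str.join "\n" cur], [PySem.Str.slice l (some 2) none]) := by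
        simp [pvStepA, hp, hc]
      rw [List.foldl_cons, hstep, pvFinishA_split]
      rw [ih [PySem.Str.slice l (some 2) none] (by simp)]
      have hcnt : pvCount (l :: t) = 0 := by simp [pvCount, hp]
      rw [hcnt]
      simp only [List.take_zero, List.drop_zero, List.append_nil]
      rw [pvLoopB.eq_2]
      simp only [List.nil_append]
      rw [pvLoopB_acc (t.drop (pvCount t)).length (t.drop (pvCount t))
            [PySem.Str.join "\n" (PySem.Str.slice l (some 2) none :: t.take (pvCount t))] (le_refl _)]
      simp
    · have hstep : pvStepA ([], cur) l = ([], cur ++ [l]) := by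
        simp [pvStepA, hp, hc]
      rw [List.foldl_cons, hstep, ih (cur ++ [l]) (by simp)]
      have hcnt : pvCount (l :: t) = pvCount t + 1 := by simp [pvCount, hp]
      rw [hcnt]
      simp [List.take_succ_cons, List.drop_succ_cons]

-- main lemma: A's fold from the empty state equals B's skip-then-slice loop
theorem pvMain : ∀ (ls : List String),
    pvFinishA (ls.foldl pvStepA ([], [])) = pvLoopB [] (pvSkip ls) := by
  intro ls
  induction ls with
  | nil => simp [pvFinishA, pvSkip, pvLoopB.eq_1]
  | cons l t ih =>
    by_cases hp : PySem.Chars.startswith l.toList ['-', ' '] = true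
    · have hstep : pvStepA ([], []) l = ([], [PySem.Str.slice l (some 2) none]) := by
        simp [pvStepA, hp]
      rw [List.foldl_cons, hstep, pvCur _ _ (by simp)]
      rw [show pvSkip (l :: t) = l :: t from by simp [pvSkip, hp]]
      rw [pvLoopB.eq_2]
      simp only [List.nil_append]
      rw [pvLoopB_acc (t.drop (pvCount t)).length (t.drop (pvCount t))
            [PySem.Str.join "\n" (PySem.Str.slice l (some 2) none :: t.take (pvCount t))] (le_refl _)]
      simp
    · have hstep : pvStepA ([], []) l = ([], []) := by simp [pvStepA, hp]
      rw [List.foldl_cons, hstep, ih]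
      rw [show pvSkip (l :: t) = pvSkip t from by simp [pvSkip, hp]]

-- ===== VERDICT (by name: the statement is the Claim_ definition above) =====
theorem parse_requirements_py_spec : Claim_equal_parse_requirements_py := by
  intro s _
  unfold Spec_parse_requirements_py parse_requirements_py parse_requirements_py_alt
  by_cases h : s = "" <;> simp [h, pvMain]
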